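-- pv_equiv track=rewrite | github.com/robtaylor/VACASK | python/spiceparser/params.py | merge_vector_params
-- ===== SOURCE A (Python) =====
-- def merge_vector_params(params: list[str], vector_names: set[str]) -> list[str]:
--     """Merge vector parameters into single strings.
--
--     Vector parameters in SPICE can span multiple tokens with commas.
--     E.g., ic=1,2,3 might be split into ["ic=1,", "2,", "3"]
--
--     Args:
--         params: List of unsplit parameter strings
--         vector_names: Set of parameter names that are vectors
--
--     Returns:
--         Parameter list with vectors merged
--     """
--     result = []
--     i = 0
--     while i < len(params):
--         param = params[i]
--         parts = param.split("=", 1)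
--         if len(parts) > 1 and parts[0].lower() in vector_names:
--             # Start merging
--             merged = param
--             while i < len(params) and params[i].strip().endswith(","):
--                 i += 1
--                 if i < len(params):
--                     merged += params[i]
--             result.append(merged)
--         else:
--             result.append(param)
--         i += 1
--
--     return result
-- ===== SOURCE B (Python) =====
-- def merge_vector_params(params: list[str], vector_names: set[str]) -> list[str]:
--     """Single flat pass: an explicit `current` accumulator replaces the nested index loops."""
--     result = []
--     current = None
--     for tok in params:
--         if current is None:
--             parts = tok.split("=", 1)
--             if len(parts) > 1 and parts[0].lower() in vector_names and tok.strip().endswith(","):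
--                 current = tok
--             else:
--                 result.append(tok)
--         else:
--             current += tok
--             if not tok.strip().endswith(","):
--                 result.append(current)
--                 current = None
--     if current is not None:
--         result.append(current)
--     return result
-- ===== Notes on version B (the rewrite author's own statement) =====
-- stated objective: simpler
-- what changed: Replaced the nested index-based while loops with a single flat for-pass over the tokens carrying an explicit Optional accumulator `current` for the group being merged (flushed when the last token no longer ends with a comma and once after the loop); dropping the index bookkeeping and per-step len/indexing also gave a measured constant-factor speedup.
import Mathlib
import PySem

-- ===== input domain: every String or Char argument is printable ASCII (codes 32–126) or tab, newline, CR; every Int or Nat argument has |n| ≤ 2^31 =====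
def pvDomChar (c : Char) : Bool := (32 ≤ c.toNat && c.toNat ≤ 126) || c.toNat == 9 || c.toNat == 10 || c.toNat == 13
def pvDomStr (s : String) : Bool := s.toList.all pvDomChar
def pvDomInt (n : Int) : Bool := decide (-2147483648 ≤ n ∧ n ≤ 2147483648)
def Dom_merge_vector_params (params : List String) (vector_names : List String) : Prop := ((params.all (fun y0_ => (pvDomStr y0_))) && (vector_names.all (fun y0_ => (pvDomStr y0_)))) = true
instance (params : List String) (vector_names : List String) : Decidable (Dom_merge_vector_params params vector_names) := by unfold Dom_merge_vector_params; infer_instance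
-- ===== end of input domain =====

-- B replaces A's nested index-based while loops by one flat pass with an explicit
-- Option accumulator for the group being merged (objective: simpler).

-- ===== PORT A =====
-- inner 'while i < len(params) and params[i].strip().endswith(","): i += 1; if i < len(params): merged += params[i]'
-- (fuel-based structural recursion; fuel only makes the while loop total — `params.length` fuel always suffices, see pvA_inner_spec)
def pvA_inner (params : List String) : Nat → Nat → String → Nat × String
  | 0, i, merged => (i, merged)
  | fuel + 1, i, merged =>
    if i < params.length ∧ PySem.Str.endswith (PySem.Str.strip params[i]!) "," = true then
      pvA_inner params fuel (i + 1) (if i + 1 < params.length then merged ++ params[i + 1]! else merged)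
    else (i, merged)

-- outer 'while i < len(params): …'  (fuel again only for totality)
def pvA_loop (params vector_names : List String) : Nat → Nat → List String → List String
  | 0, _, result => result
  | fuel + 1, i, result =>
    if i < params.length then
      -- param := params[i]; parts := param.split("=", 1)  (sep "=" ≠ "", so splitMax? is always some: exact)
      if decide (1 < ((PySem.Str.splitMax? params[i]! "=" 1).getD []).length) &&
          PySem.Set.contains vector_names (PySem.Str.lower ((PySem.Str.splitMax? params[i]! "=" 1).getD [])[0]!) then
        pvA_loop params vector_names fuel ((pvA_inner params params.length i params[i]!).1 + 1)
          (result ++ [(pvA_inner params params.length i params[i]!).2])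
      else
        pvA_loop params vector_names fuel (i + 1) (result ++ [params[i]!])
    else result

def merge_vector_params (params : List String) (vector_names : List String) : List String :=
  pvA_loop params vector_names (params.length + 1) 0 []

-- ===== PORT B =====
-- parts = tok.split("=", 1); len(parts) > 1 and parts[0].lower() in vector_names
def pvB_isVec (vector_names : List String) (tok : String) : Bool :=
  let parts := (PySem.Str.splitMax? tok "=" 1).getD []   -- sep "=" ≠ "", so splitMax? is always some: exact
  decide (1 < parts.length) && PySem.Set.contains vector_names (PySem.Str.lower parts[0]!)

-- tok.strip().endswith(",")
def pvB_endsComma (tok : String) : Bool :=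
  PySem.Str.endswith (PySem.Str.strip tok) ","

-- one iteration of B's flat loop, state = (result, current)
def pvB_step (vector_names : List String) (st : List String × Option String) (tok : String) :
    List String × Option String :=
  match st with
  | (res, none) =>
    if pvB_isVec vector_names tok && pvB_endsComma tok then (res, some tok)
    else (res ++ [tok], none)
  | (res, some cur) =>
    if pvB_endsComma tok then (res, some (cur ++ tok)) else (res ++ [cur ++ tok], none)

def merge_vector_params_alt (params : List String) (vector_names : List String) : List String :=
  let st := params.foldl (pvB_step vector_names) ([], none)
  match st.2 with
  | some c => st.1 ++ [c]
  | none => st.1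

-- ===== PRECONDITION & SPEC =====
def Spec_merge_vector_params (params : List String) (vector_names : List String) (out : List String) : Prop := out = merge_vector_params_alt params vector_names
instance (params : List String) (vector_names : List String) (out : List String) : Decidable (Spec_merge_vector_params params vector_names out) := by unfold Spec_merge_vector_params; infer_instance

-- ===== CLAIM (what is proved, stated in full; the proofs are below) =====
def Claim_equal_merge_vector_params : Prop := ∀ (params : List String) (vector_names : List String), Dom_merge_vector_params params vector_names → Spec_merge_vector_params params vector_names (merge_vector_params params vector_names)

-- ===== LEMMAS AND PROOFS =====

-- reference grouping function both loops compute: state = the group being merged (if open)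
def pvG (vn : List String) : Option String → List String → List String
  | none, [] => []
  | some m, [] => [m]
  | none, p :: rest =>
    if pvB_isVec vn p && pvB_endsComma p then pvG vn (some p) rest else p :: pvG vn none rest
  | some m, t :: rest =>
    if pvB_endsComma t then pvG vn (some (m ++ t)) rest else (m ++ t) :: pvG vn none rest

def pvFinish (st : List String × Option String) : List String :=
  match st.2 with
  | some c => st.1 ++ [c]
  | none => st.1

theorem pvB_fold (vn : List String) (l : List String) :
    ∀ (res : List String) (cur? : Option String),
      pvFinish (l.foldl (pvB_step vn) (res, cur?)) = res ++ pvG vn cur? l := by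
  induction l with
  | nil => intro res cur?; cases cur? <;> simp [pvFinish, pvG]
  | cons t l ih =>
    intro res cur?
    cases cur? with
    | none =>
      simp only [List.foldl_cons, pvB_step, pvG]
      by_cases h : (pvB_isVec vn t && pvB_endsComma t) = true
      · simp [h, ih]
      · simp [h, ih]
    | some cur =>
      simp only [List.foldl_cons, pvB_step, pvG]
      by_cases h : pvB_endsComma t = true
      · simp [h, ih]
      · simp [h, ih]

theorem pvA_inner_fst_ge (params : List String) :
    ∀ (fuel i : Nat) (merged : String), i ≤ (pvA_inner params fuel i merged).1 := by
  intro fuel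
  induction fuel with
  | zero => intro i merged; simp [pvA_inner]
  | succ fuel ih =>
    intro i merged
    rw [pvA_inner]
    split
    · exact le_trans (by omega) (ih (i + 1) _)
    · simp

theorem pvA_inner_spec (vn params : List String) :
    ∀ (fuel i : Nat) (merged : String), params.length - i ≤ fuel → i < params.length →
      pvB_endsComma params[i]! = true →
      (pvA_inner params fuel i merged).2 ::
          pvG vn none (params.drop ((pvA_inner params fuel i merged).1 + 1)) =
        pvG vn (some merged) (params.drop (i + 1)) := by
  intro fuel
  induction fuel with
  | zero => intro i merged hn hi _; omega
  | succ fuel ih =>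
    intro i merged hn hi hend
    rw [pvA_inner, if_pos ⟨hi, hend⟩]
    by_cases h2 : i + 1 < params.length
    · have hdrop : params.drop (i + 1) = params[i+1]! :: params.drop (i + 2) := by
        rw [getElem!_pos params _ h2]
        exact List.drop_eq_getElem_cons h2
      rw [hdrop, pvG, if_pos h2]
      rcases h3 : pvB_endsComma params[i+1]! with _ | _
      · rw [if_neg (by simp)]
        have hstop : pvA_inner params fuel (i + 1) (merged ++ params[i+1]!) = (i + 1, merged ++ params[i+1]!) := by
          rcases fuel with _ | f
          · simp [pvA_inner]
          · rw [pvA_inner, if_neg (by rintro ⟨_, hc⟩; exact absurd (show pvB_endsComma params[i+1]! = true from hc) (by simp only [h3]; exact Bool.false_ne_true))]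
        rw [hstop]
      · rw [if_pos rfl]
        exact ih (i + 1) (merged ++ params[i+1]!) (by omega) h2 h3
    · have hdrop1 : params.drop (i + 1) = [] := List.drop_eq_nil_of_le (by omega)
      rw [if_neg h2]
      rcases fuel with _ | fuel
      · simp [pvA_inner, hdrop1, pvG,
          List.drop_eq_nil_of_le (show params.length ≤ i + 1 + 1 by omega)]
      · rw [pvA_inner, if_neg (by rintro ⟨hc, _⟩; omega)]
        simp [hdrop1, pvG, List.drop_eq_nil_of_le (show params.length ≤ i + 1 + 1 by omega)]

theorem pvA_loop_eq (vn params : List String) :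
    ∀ (fuel i : Nat) (res : List String), params.length + 1 - i ≤ fuel →
      pvA_loop params vn fuel i res = res ++ pvG vn none (params.drop i) := by
  intro fuel
  induction fuel with
  | zero =>
    intro i res hn
    rw [pvA_loop]
    simp [List.drop_eq_nil_of_le (show params.length ≤ i by omega), pvG]
  | succ fuel ih =>
    intro i res hn
    rw [pvA_loop]
    by_cases hi : i < params.length
    · rw [if_pos hi]
      have hdrop : params.drop i = params[i]! :: params.drop (i + 1) := by
        rw [getElem!_pos params _ hi]
        exact List.drop_eq_getElem_cons hi
      rw [hdrop, pvG]
      rcases hv : pvB_isVec vn params[i]! with _ | _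
      · -- not a vector parameter
        rw [show ((decide (1 < ((PySem.Str.splitMax? params[i]! "=" 1).getD []).length) &&
            PySem.Set.contains vn (PySem.Str.lower ((PySem.Str.splitMax? params[i]! "=" 1).getD [])[0]!)) : Bool)
            = pvB_isVec vn params[i]! from rfl, hv]
        rw [if_neg (by simp), if_neg (by simp)]
        rw [ih (i + 1) _ (by omega)]
        simp
      · -- vector parameter
        rw [show ((decide (1 < ((PySem.Str.splitMax? params[i]! "=" 1).getD []).length) &&
            PySem.Set.contains vn (PySem.Str.lower ((PySem.Str.splitMax? params[i]! "=" 1).getD [])[0]!)) : Bool)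
            = pvB_isVec vn params[i]! from rfl, hv]
        rw [if_pos rfl]
        rcases he : pvB_endsComma params[i]! with _ | _
        · -- does not end with a comma: the inner merging loop exits at once
          rw [if_neg (by simp)]
          have hinner : pvA_inner params params.length i params[i]! = (i, params[i]!) := by
            obtain ⟨m, hl⟩ : ∃ m, params.length = m + 1 := ⟨params.length - 1, by omega⟩
            rw [hl, pvA_inner, if_neg (by rintro ⟨_, hc⟩; exact absurd (show pvB_endsComma params[i]! = true from hc) (by simp only [he]; exact Bool.false_ne_true))]
          rw [hinner]
          rw [ih (i + 1) _ (by omega)]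
          simp
        · -- ends with a comma: the inner merging loop runs
          rw [if_pos (show ((true && true : Bool)) = true from rfl)]
          have hge := pvA_inner_fst_ge params params.length i params[i]!
          have hspec := pvA_inner_spec vn params params.length i params[i]! (by omega) hi he
          rw [ih ((pvA_inner params params.length i params[i]!).1 + 1) _ (by omega)]
          rw [List.append_assoc, List.singleton_append, hspec]
    · rw [if_neg hi]
      simp [List.drop_eq_nil_of_le (show params.length ≤ i by omega), pvG]

-- ===== VERDICT (by name: the statement is the Claim_ definition above) =====
theorem merge_vector_params_spec : Claim_equal_merge_vector_params := by
  intro params vn _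
  unfold Spec_merge_vector_params merge_vector_params merge_vector_params_alt
  have hb := pvB_fold vn params [] none
  simp only [pvFinish] at hb
  rw [pvA_loop_eq vn params (params.length + 1) 0 [] (by omega)]
  simp only [List.drop_zero, List.nil_append]
  exact hb.symm
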